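-- pv_equiv track=rewrite | github.com/zliu53468-ai/BGS0.3V.1 | app.py | _alt_streak_suffix
-- ===== SOURCE A (Python) =====
-- from typing import Dict, Any, List, Tuple
--
-- def _alt_streak_suffix(seq: List[str]) -> int:
--     s = [c for c in seq if c in ("B","P")]
--     if len(s) < 2: return 0
--     k=1
--     for i in range(len(s)-2,-1,-1):
--         if s[i]!=s[i+1]: k+=1
--         else: break
--     return k
-- ===== SOURCE B (Python) =====
-- from typing import List
--
-- def _alt_streak_suffix(seq: List[str]) -> int:
--     s = [c for c in seq if c in ("B", "P")]
--     if len(s) < 2: return 0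
--     streak = 1
--     prev = s[0]
--     for c in s[1:]:
--         if c != prev:
--             streak += 1
--         else:
--             streak = 1
--         prev = c
--     return streak
-- ===== Notes on version B (the rewrite author's own statement) =====
-- stated objective: alternative
-- what changed: Replaces the backward index scan with early break by a single forward pass that carries (prev, streak) and resets the counter at each equal-adjacent pair; the final counter equals the trailing alternating run length.
import Mathlib
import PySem

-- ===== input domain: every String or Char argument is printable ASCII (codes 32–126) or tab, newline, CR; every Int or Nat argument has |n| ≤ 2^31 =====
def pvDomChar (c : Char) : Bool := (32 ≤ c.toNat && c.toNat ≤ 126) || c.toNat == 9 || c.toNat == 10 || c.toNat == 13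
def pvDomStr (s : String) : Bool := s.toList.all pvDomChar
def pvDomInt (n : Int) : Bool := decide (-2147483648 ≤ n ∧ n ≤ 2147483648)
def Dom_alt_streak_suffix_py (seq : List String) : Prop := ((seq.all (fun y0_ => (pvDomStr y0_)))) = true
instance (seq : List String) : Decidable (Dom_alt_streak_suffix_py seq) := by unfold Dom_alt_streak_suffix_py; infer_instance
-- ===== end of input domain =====

-- B replaces A's backward index scan with early break by a single forward pass
-- carrying (prev, streak) that resets at each equal-adjacent pair (objective: alternative).


-- ===== PORT A =====
-- backward loop `for i in range(len(s)-2,-1,-1): if s[i]!=s[i+1]: k+=1 else: break`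
-- as structural recursion on the index i (indices stay in range, so getD is exact)
def altA_loop (s : List String) (i : Nat) (k : Int) : Int :=
  if s.getD i "" ≠ s.getD (i + 1) "" then
    match i with
    | 0 => k + 1
    | j + 1 => altA_loop s j (k + 1)
  else k

def alt_streak_suffix_py (seq : List String) : Int :=
  let s := seq.filter (fun c => c == "B" || c == "P")
  if s.length < 2 then 0
  else altA_loop s (s.length - 2) 1

-- ===== PORT B =====
-- forward pass over s[1:] carrying (prev, streak); streak resets to 1 on equality
def altB_loop (prev : String) (streak : Int) (rest : List String) : Int :=
  match rest with
  | [] => streak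
  | c :: t => if c ≠ prev then altB_loop c (streak + 1) t else altB_loop c 1 t

def alt_streak_suffix_py_alt (seq : List String) : Int :=
  let s := seq.filter (fun c => c == "B" || c == "P")
  if s.length < 2 then 0
  else altB_loop (s.getD 0 "") 1 (s.drop 1)

-- ===== PRECONDITION & SPEC =====
def Spec_alt_streak_suffix_py (seq : List String) (out : Int) : Prop := out = alt_streak_suffix_py_alt seq
instance (seq : List String) (out : Int) : Decidable (Spec_alt_streak_suffix_py seq out) := by unfold Spec_alt_streak_suffix_py; infer_instance

-- ===== CLAIM (what is proved, stated in full; the proofs are below) =====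
def Claim_equal_alt_streak_suffix_py : Prop := ∀ (seq : List String), Dom_alt_streak_suffix_py seq → Spec_alt_streak_suffix_py seq (alt_streak_suffix_py seq)

-- ===== LEMMAS AND PROOFS =====

-- length of the alternating prefix (stopping at the first equal pair) of a reversed list:
-- both loops compute rstreak s.reverse on the filtered list s (when s.length ≥ 2)
def rstreak : List String → Int
  | [] => 0
  | [_] => 1
  | a :: b :: r => if a ≠ b then 1 + rstreak (b :: r) else 1

theorem rstreak_cons_cons (a b : String) (r : List String) :
    rstreak (a :: b :: r) = if a ≠ b then 1 + rstreak (b :: r) else 1 := rfl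

theorem altB_loop_rstreak (xs : List String) :
    ∀ (prev : String) (rest : List String),
      altB_loop prev (rstreak (prev :: rest)) xs = rstreak (xs.reverse ++ prev :: rest) := by
  induction xs with
  | nil => intro prev rest; simp [altB_loop]
  | cons c t ih =>
    intro prev rest
    show (if c ≠ prev then altB_loop c (rstreak (prev :: rest) + 1) t
          else altB_loop c 1 t) = _
    by_cases h : c = prev
    · have h1 : (1 : Int) = rstreak (c :: prev :: rest) := by
        rw [rstreak_cons_cons]; simp [h]
      simp only [h, ne_eq, not_true_eq_false, if_false, h1, ih]
      simp
    · have h1 : rstreak (prev :: rest) + 1 = rstreak (c :: prev :: rest) := by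
        rw [rstreak_cons_cons]; simp [h]; ring
      simp only [ne_eq, h, not_false_eq_true, if_true, h1, ih]
      simp

theorem altA_loop_rstreak (s : List String) :
    ∀ (i : Nat) (k : Int), i + 1 < s.length →
      altA_loop s i k = k - 1 + rstreak (s.take (i + 2)).reverse := by
  intro i
  induction i with
  | zero =>
    intro k h
    have h0 : 0 < s.length := by omega
    have htake : (s.take 2).reverse = [s[1], s[0]] := by
      rw [List.take_add_one, List.take_add_one, List.take_zero]
      simp [h, h0]
    rw [altA_loop, htake, List.getD_eq_getElem s _ h0, List.getD_eq_getElem s _ h,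
      rstreak_cons_cons]
    by_cases hne : s[0] = s[1] <;> simp [hne, Ne.symm, rstreak] <;> ring
  | succ j ih =>
    intro k h
    have h1 : j + 1 < s.length := by omega
    have h2 : j + 2 < s.length := by omega
    have htake : (s.take (j + 3)).reverse = s[j+2] :: s[j+1] :: (s.take (j+1)).reverse := by
      rw [List.take_add_one (i := j+2), List.take_add_one (i := j+1)]
      simp [h1, h2]
    have htake2 : (s.take (j + 2)).reverse = s[j+1] :: (s.take (j+1)).reverse := by
      rw [List.take_add_one (i := j+1)]
      simp [h1]
    rw [altA_loop, List.getD_eq_getElem s _ h1, List.getD_eq_getElem s _ h2,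
      htake, rstreak_cons_cons]
    by_cases hne : s[j+1] = s[j+2]
    · simp [hne]
    · simp only [ne_eq, hne, not_false_eq_true, if_true, Ne.symm hne, ih (k + 1) h1, htake2]
      ring

theorem head_drop_eq (s : List String) (h : 0 < s.length) :
    s[0] :: s.drop 1 = s := List.getElem_cons_drop h

theorem alt_streak_suffix_py_spec : Claim_equal_alt_streak_suffix_py := by
  intro seq _
  unfold Spec_alt_streak_suffix_py alt_streak_suffix_py alt_streak_suffix_py_alt
  set s := seq.filter (fun c => c == "B" || c == "P") with hs
  by_cases hlen : s.length < 2
  · simp [hlen]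
  · have h2 : 2 ≤ s.length := by omega
    have h0 : 0 < s.length := by omega
    simp only [hlen, if_false]
    have hA : altA_loop s (s.length - 2) 1 = rstreak s.reverse := by
      have hi : (s.length - 2) + 1 < s.length := by omega
      rw [altA_loop_rstreak s _ 1 hi]
      have : (s.length - 2) + 2 = s.length := by omega
      rw [this, List.take_length]
      ring
    have hB : altB_loop (s.getD 0 "") 1 (s.drop 1) = rstreak s.reverse := by
      rw [List.getD_eq_getElem s _ h0]
      have h1 : (1 : Int) = rstreak (s[0] :: ([] : List String)) := rfl
      rw [h1, altB_loop_rstreak]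
      congr 1
      have := head_drop_eq s h0
      calc (s.drop 1).reverse ++ [s[0]] = (s[0] :: s.drop 1).reverse := by simp
        _ = s.reverse := by rw [this]
    rw [hA, hB]
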